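-- pv_equiv track=rewrite | github.com/punyanishivam/Python | FunWithAnagrams.py | funWithAnagrams
-- ===== SOURCE A (Python) =====
-- def funWithAnagrams(text):
--     from collections import Counter
--     i = 0
--     text = sorted(text)
--     while i < len(text) - 1:
--         if Counter(text[i]) == Counter(text[i+1]):
--                 text.remove(text[i+1])
--                 i = 0
--         else:
--             i += 1
--
--
--     return sorted(text)
-- ===== SOURCE B (Python) =====
-- def funWithAnagrams(text):
--     out = []
--     prev = None
--     for s in sorted(text):
--         sig = sorted(s)
--         if sig != prev:
--             out.append(s)
--             prev = sig
--     return out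
-- ===== Notes on version B (the rewrite author's own statement) =====
-- stated objective: faster
-- what changed: Replaces A's restart-from-zero removal loop (rebuilding and comparing Counters and calling list.remove on every step) with one sort followed by a single linear pass that keeps a string unless its sorted-character signature equals that of the last kept string.
import Mathlib
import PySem

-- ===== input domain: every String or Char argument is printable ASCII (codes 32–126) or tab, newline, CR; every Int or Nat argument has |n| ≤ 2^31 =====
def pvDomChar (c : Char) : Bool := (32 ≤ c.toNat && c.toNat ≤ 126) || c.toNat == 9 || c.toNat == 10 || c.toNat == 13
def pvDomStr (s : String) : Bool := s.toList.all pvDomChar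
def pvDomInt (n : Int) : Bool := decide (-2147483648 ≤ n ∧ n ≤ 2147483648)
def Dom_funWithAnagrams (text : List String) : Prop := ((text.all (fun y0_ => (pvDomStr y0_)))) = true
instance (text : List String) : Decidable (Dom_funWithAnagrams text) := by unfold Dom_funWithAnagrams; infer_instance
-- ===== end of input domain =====

-- B replaces A's quadratic restart-from-zero removal loop (with an O(L) Counter
-- comparison per step) by one sort followed by a single pass that keeps a string
-- unless its sorted-character signature equals that of the last kept string.

-- ===== PORT A =====
-- Counter(x) == Counter(y): Python dict equality — same key set, same counts (order ignored).
def pvCounterEq (d1 d2 : PySem.Dict Char Int) : Bool :=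
  (d1.keys.all fun k => d2.contains k) &&
  (d2.keys.all fun k => d1.contains k) &&
  (d1.keys.all fun k => d1.getD k 0 == d2.getD k 0)

-- termination helper for the removal branch of the while loop
theorem pvGetI (text : List String) (j : Nat) (h : j < text.length) :
    (PySem.List.pyGet? text (j : Int)).getD "" = text[j] := by
  rw [PySem.List.pyGet?_natCast, List.getElem?_eq_getElem h]; rfl

theorem pvGetI1 (text : List String) (i : Nat) (h : i + 1 < text.length) :
    (PySem.List.pyGet? text ((i : Int) + 1)).getD "" = text[i + 1] := by
  have hc : (i : Int) + 1 = ((i + 1 : Nat) : Int) := by push_cast; ring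
  rw [hc, pvGetI text (i + 1) h]

theorem pvRemove_length_lt (text : List String) (i : Nat) (h : i + 1 < text.length) :
    ((PySem.List.remove? text ((PySem.List.pyGet? text ((i : Int) + 1)).getD "")).getD text).length
      < text.length := by
  rw [pvGetI1 text i h,
    PySem.List.remove?_eq_some_erase text _ (List.getElem_mem h), Option.getD_some]
  have := List.length_erase_of_mem (List.getElem_mem h)
  omega

-- the while loop: state (text, i); `text.remove(text[i+1])` then restart at i = 0
def pvLoopA (text : List String) (i : Nat) : List String :=
  if h : i < text.length - 1 then
    if pvCounterEq
        (PySem.Dict.counter ((PySem.List.pyGet? text (i : Int)).getD "").toList)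
        (PySem.Dict.counter ((PySem.List.pyGet? text ((i : Int) + 1)).getD "").toList) then
      pvLoopA ((PySem.List.remove? text ((PySem.List.pyGet? text ((i : Int) + 1)).getD "")).getD text) 0
    else
      pvLoopA text (i + 1)
  else text
termination_by (text.length, text.length - i)
decreasing_by
  · exact Prod.Lex.left _ _ (pvRemove_length_lt text i (by omega))
  · exact Prod.Lex.right _ (by omega)

def funWithAnagrams (text : List String) : List String :=
  PySem.List.sorted (pvLoopA (PySem.List.sorted text (fun x => x) false) 0) (fun x => x) false

-- ===== PORT B =====
-- sig = sorted(s)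
def pvSig (s : String) : List Char := PySem.List.sorted s.toList (fun c => c) false

-- one iteration of B's for loop over (out, prev)
def pvStepB (acc : List String × Option (List Char)) (s : String) :
    List String × Option (List Char) :=
  let sig := pvSig s
  if some sig ≠ acc.2 then (acc.1 ++ [s], some sig) else acc

def funWithAnagrams_alt (text : List String) : List String :=
  ((PySem.List.sorted text (fun x => x) false).foldl pvStepB ([], none)).1

-- ===== PRECONDITION & SPEC =====
def Spec_funWithAnagrams (text : List String) (out : List String) : Prop := out = funWithAnagrams_alt text
instance (text : List String) (out : List String) : Decidable (Spec_funWithAnagrams text out) := by unfold Spec_funWithAnagrams; infer_instance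

-- ===== CLAIM (what is proved, stated in full; the proofs are below) =====
def Claim_equal_funWithAnagrams : Prop := ∀ (text : List String), Dom_funWithAnagrams text → Spec_funWithAnagrams text (funWithAnagrams text)

-- ===== LEMMAS AND PROOFS =====

-- proof-side recursion equivalent to B's fold: keep y unless its signature equals prev
def pvGo (prev : Option (List Char)) : List String → List String
  | [] => []
  | y :: ys => if some (pvSig y) ≠ prev then y :: pvGo (some (pvSig y)) ys else pvGo prev ys

theorem pvFoldB (l : List String) (acc : List String) (prev : Option (List Char)) :
    (l.foldl pvStepB (acc, prev)).1 = acc ++ pvGo prev l := by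
  induction l generalizing acc prev with
  | nil => simp [pvGo]
  | cons y ys ih =>
    simp only [List.foldl_cons, pvStepB, pvGo]
    by_cases hc : some (pvSig y) ≠ prev
    · simp [hc, ih]
    · simp [hc, ih]

theorem pvAlt_eq (text : List String) :
    funWithAnagrams_alt text = pvGo none (PySem.List.sorted text (fun x => x) false) := by
  simpa using pvFoldB (PySem.List.sorted text (fun x => x) false) [] none

theorem pvCounterEq_iff (a b : List Char) :
    pvCounterEq (PySem.Dict.counter a) (PySem.Dict.counter b) = true ↔ a.Perm b := by
  unfold pvCounterEq
  simp only [Bool.and_eq_true, List.all_eq_true, PySem.Dict.keys_counter,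
    PySem.Dict.getD_counter, PySem.Dict.contains_counter, beq_iff_eq, List.contains_iff_mem]
  constructor
  · rintro ⟨⟨h1, h2⟩, h3⟩
    rw [List.perm_iff_count]
    intro v
    by_cases hv : v ∈ a
    · exact_mod_cast h3 v ((PySem.Set.mem_ofList a v).mpr hv)
    · have hvb : v ∉ b := fun hb => hv (h2 v ((PySem.Set.mem_ofList b v).mpr hb))
      rw [List.count_eq_zero_of_not_mem hv, List.count_eq_zero_of_not_mem hvb]
  · intro h
    refine ⟨⟨fun k hk => ?_, fun k hk => ?_⟩, fun k _ => ?_⟩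
    · exact h.mem_iff.mp ((PySem.Set.mem_ofList a k).mp hk)
    · exact h.symm.mem_iff.mp ((PySem.Set.mem_ofList b k).mp hk)
    · simp [h.count_eq]

theorem pvAnag_iff (x y : String) :
    pvCounterEq (PySem.Dict.counter x.toList) (PySem.Dict.counter y.toList) = true ↔
      pvSig x = pvSig y := by
  rw [pvCounterEq_iff, pvSig, pvSig, ← PySem.List.sorted_id_eq_sorted_id_iff_perm]

theorem pvGo_chain (p : String) (l : List String)
    (h : List.IsChain (fun x y => pvSig x ≠ pvSig y) (p :: l)) :
    pvGo (some (pvSig p)) l = l := by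
  induction l generalizing p with
  | nil => rfl
  | cons y ys ih =>
    rcases List.isChain_cons_cons.mp h with ⟨h1, h2⟩
    simp only [pvGo]
    rw [if_pos (by simpa using fun e => h1 e.symm), ih y h2]

theorem pvGo_none (l : List String)
    (h : List.IsChain (fun x y => pvSig x ≠ pvSig y) l) :
    pvGo none l = l := by
  cases l with
  | nil => rfl
  | cons x xs =>
    simp only [pvGo, if_pos (by simp : some (pvSig x) ≠ none)]
    rw [pvGo_chain x xs h]

theorem pvGo_erase (t : List String) (i : Nat) (hp : t.Pairwise (· ≤ ·))
    (h1 : i + 1 < t.length) (ha : pvSig t[i] = pvSig t[i + 1]) (prev : Option (List Char)) :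
    pvGo prev (t.erase t[i + 1]) = pvGo prev t := by
  induction t generalizing i prev with
  | nil => simp at h1
  | cons x t' ih =>
    have h1' : i < t'.length := by simpa using h1
    have hv : (x :: t')[i + 1] = t'[i] := List.getElem_cons_succ ..
    by_cases hx : x = t'[i]
    · cases t' with
      | nil => simp at h1'
      | cons y t'' =>
        have hxy : x ≤ y := List.rel_of_pairwise_cons hp (List.mem_cons_self ..)
        have hyv : y ≤ (y :: t'')[i] := by
          cases i with
          | zero => simp
          | succ j =>
            have hp' : (y :: t'').Pairwise (· ≤ ·) := (List.pairwise_cons.mp hp).2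
            have hj : j < t''.length := by simpa using h1'
            simpa using List.rel_of_pairwise_cons hp' (List.getElem_mem hj)
        have hyx : y = x := le_antisymm (le_of_le_of_eq hyv hx.symm) hxy
        subst hyx
        rw [hv, ← hx, List.erase_cons_head]
        by_cases hc : some (pvSig y) ≠ prev <;> simp [pvGo, hc]
    · have herase : (x :: t').erase (x :: t')[i + 1] = x :: t'.erase t'[i] := by
        rw [hv]; exact List.erase_cons_tail (by simpa using fun e => hx e)
      rw [herase]
      cases i with
      | zero =>
        cases t' with
        | nil => simp at h1'
        | cons y t'' =>
          have hxy : pvSig x = pvSig y := by simpa using ha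
          simp only [List.getElem_cons_zero, List.erase_cons_head]
          by_cases hc : some (pvSig x) ≠ prev
          · simp [pvGo, hc, hxy.symm]
          · have hc' : prev = some (pvSig x) := by
              by_contra hne; exact hc fun e => hne e.symm
            simp [pvGo, hc', hxy.symm]
      | succ j =>
        have hp' : t'.Pairwise (· ≤ ·) := (List.pairwise_cons.mp hp).2
        have hj : j + 1 < t'.length := h1'
        have ha' : pvSig t'[j] = pvSig t'[j + 1] := by simpa using ha
        by_cases hc : some (pvSig x) ≠ prev <;>
          simp [pvGo, hc, ih j hp' hj ha']

theorem pvGo_sublist (prev : Option (List Char)) (l : List String) :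
    (pvGo prev l).Sublist l := by
  induction l generalizing prev with
  | nil => simp [pvGo]
  | cons y ys ih =>
    simp only [pvGo]
    by_cases hc : some (pvSig y) ≠ prev
    · simpa [hc] using (ih (some (pvSig y))).cons₂ y
    · simpa [hc] using (ih prev).cons y

theorem pvLoopA_eq : ∀ (text : List String) (i : Nat), text.Pairwise (· ≤ ·) →
    (∀ j, j < i → ∀ (hj : j + 1 < text.length), pvSig text[j] ≠ pvSig text[j + 1]) →
    pvLoopA text i = pvGo none text := by
  intro text i
  induction text, i using pvLoopA.induct with
  | case1 text i h hcond ih =>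
    intro hs hclean
    have hi1 : i + 1 < text.length := by omega
    rw [pvGetI text i (by omega), pvGetI1 text i hi1] at hcond
    have hsig : pvSig text[i] = pvSig text[i + 1] := (pvAnag_iff _ _).mp hcond
    have herase : (PySem.List.remove? text
        ((PySem.List.pyGet? text ((i : Int) + 1)).getD "")).getD text = text.erase text[i + 1] := by
      rw [pvGetI1 text i hi1,
        PySem.List.remove?_eq_some_erase text _ (List.getElem_mem hi1), Option.getD_some]
    rw [pvLoopA]
    rw [dif_pos h, if_pos (by rw [pvGetI text i (by omega), pvGetI1 text i hi1]; exact hcond)]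
    rw [herase] at ih ⊢
    rw [ih (List.Pairwise.sublist (List.erase_sublist ..) hs) (by omega)]
    exact pvGo_erase text i hs hi1 hsig none
  | case2 text i h hcond ih =>
    intro hs hclean
    have hi1 : i + 1 < text.length := by omega
    rw [pvLoopA, dif_pos h, if_neg hcond]
    refine ih hs fun j hj hj1 => ?_
    rcases Nat.lt_succ_iff_lt_or_eq.mp hj with hj' | hj'
    · exact hclean j hj' hj1
    · subst hj'
      rw [pvGetI text j (by omega), pvGetI1 text j hj1] at hcond
      intro he
      exact hcond ((pvAnag_iff _ _).mpr he)
  | case3 text i h =>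
    intro hs hclean
    rw [pvLoopA, dif_neg h]
    exact (pvGo_none text (List.isChain_iff_getElem.mpr fun j hj =>
      hclean j (by omega) hj)).symm

-- ===== VERDICT (by name: the statement is the Claim_ definition above) =====
theorem funWithAnagrams_spec : Claim_equal_funWithAnagrams := by
  intro text _
  unfold Spec_funWithAnagrams funWithAnagrams
  rw [pvAlt_eq]
  have hs : (PySem.List.sorted text (fun x => x) false).Pairwise (· ≤ ·) :=
    PySem.List.sorted_pairwise text (fun x => x)
  rw [pvLoopA_eq _ 0 hs (by omega)]
  exact PySem.List.sorted_eq_self_of_pairwise _ _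
    ((List.Pairwise.sublist (pvGo_sublist none _) hs))
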